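-- pv_equiv track=rewrite | github.com/cromatical/TIL | Algorithm-Python/Baekjoon 1439 문자열뒤집기.py | solution
-- ===== SOURCE A (Python) =====
-- def solution(n):
-- 	cnt_0 = 0
-- 	cnt_1 = 0
-- 	i = 0
--
-- 	while i < len(n):
-- 		j = 0
-- 		if i + j < len(n) and n[i] == n[i + j]:
-- 			while i + j < len(n) and n[i] == n[i + j]:
-- 				j += 1
-- 			if n[i] == '0':
-- 				cnt_0 += 1
-- 			else:
-- 				cnt_1 += 1
-- 			i += j
-- 		else:
-- 			i += 1
-- 	return ('0', cnt_0), ('1', cnt_1)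
-- ===== SOURCE B (Python) =====
-- def solution(n):
--     cnt_0 = 0
--     cnt_1 = 0
--     prev = None
--     for c in n:
--         if c != prev:
--             if c == '0':
--                 cnt_0 += 1
--             else:
--                 cnt_1 += 1
--             prev = c
--     return ('0', cnt_0), ('1', cnt_1)
-- ===== Notes on version B (the rewrite author's own statement) =====
-- stated objective: simpler
-- what changed: Replaced the nested while loops that skip whole runs via index arithmetic with a single for-pass that counts a run boundary whenever the current character differs from the previous one.
import Mathlib
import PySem

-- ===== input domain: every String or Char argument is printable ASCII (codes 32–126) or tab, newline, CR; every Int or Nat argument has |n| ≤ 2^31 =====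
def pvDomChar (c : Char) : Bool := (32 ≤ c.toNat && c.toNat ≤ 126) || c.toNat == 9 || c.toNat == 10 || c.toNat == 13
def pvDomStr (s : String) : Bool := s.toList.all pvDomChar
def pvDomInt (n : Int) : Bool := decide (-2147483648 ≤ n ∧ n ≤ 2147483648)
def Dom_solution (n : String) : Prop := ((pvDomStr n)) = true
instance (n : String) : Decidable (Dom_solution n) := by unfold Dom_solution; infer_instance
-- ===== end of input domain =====

-- B replaces A's nested run-skipping while loops by a single pass comparing each character
-- with the previous one (objective: simpler).

-- ===== PORT A =====
-- inner 'while i + j < len(n) and n[i] == n[i+j]: j += 1' — counts how far the current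
-- character repeats from position i (here: over the suffix starting at i).
def innerA (c : Char) : List Char → Nat
  | [] => 0
  | x :: xs => if c = x then innerA c xs + 1 else 0

-- outer 'while i < len(n)' of A, recursing on the suffix of n starting at i.
def loopA : List Char → Int → Int → Int × Int
  | [], c0, c1 => (c0, c1)
  | x :: xs, c0, c1 =>
    -- A's guard 'i + 0 < len(n) and n[i] == n[i+0]' is x = x here (else: i += 1)
    if x = x then
      let j := innerA x (x :: xs)
      if x = '0' then loopA ((x :: xs).drop j) (c0 + 1) c1
      else loopA ((x :: xs).drop j) c0 (c1 + 1)
    else loopA xs c0 c1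
termination_by s => s.length
decreasing_by
  · simp [innerA]
  · simp [innerA]
  · simp

def solution (n : String) : (String × Int) × (String × Int) :=
  let (c0, c1) := loopA n.toList 0 0
  (("0", c0), ("1", c1))

-- ===== PORT B =====
-- single for-pass of Source B: state (prev, cnt_0, cnt_1)
def loopB : List Char → Option Char → Int → Int → Int × Int
  | [], _, c0, c1 => (c0, c1)
  | c :: rest, prev, c0, c1 =>
    if some c ≠ prev then
      if c = '0' then loopB rest (some c) (c0 + 1) c1
      else loopB rest (some c) c0 (c1 + 1)
    else loopB rest prev c0 c1

def solution_alt (n : String) : (String × Int) × (String × Int) :=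
  let (c0, c1) := loopB n.toList none 0 0
  (("0", c0), ("1", c1))

-- ===== PRECONDITION & SPEC =====
def Spec_solution (n : String) (out : (String × Int) × (String × Int)) : Prop := out = solution_alt n
instance (n : String) (out : (String × Int) × (String × Int)) : Decidable (Spec_solution n out) := by unfold Spec_solution; infer_instance

-- ===== CLAIM (what is proved, stated in full; the proofs are below) =====
def Claim_equal_solution : Prop := ∀ (n : String), Dom_solution n → Spec_solution n (solution n)

-- ===== LEMMAS AND PROOFS =====

-- B skips the rest of the current run without counting
theorem skipB (xs : List Char) (c : Char) (c0 c1 : Int) :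
    loopB xs (some c) c0 c1 = loopB (xs.drop (innerA c xs)) (some c) c0 c1 := by
  induction xs generalizing c0 c1 with
  | nil => simp [innerA]
  | cons x xs ih =>
    by_cases h : c = x
    · subst h
      simp [innerA, loopB, ih]
    · simp [innerA, h]

-- after skipping a run of c, the next character (if any) differs from c
theorem head_drop_innerA (xs : List Char) (c h : Char)
    (hh : (xs.drop (innerA c xs)).head? = some h) : h ≠ c := by
  induction xs with
  | nil => simp [innerA] at hh
  | cons x xs ih =>
    by_cases hx : c = x
    · subst hx
      simp only [innerA] at hh
      exact ih hh
    · simp only [innerA, if_neg hx, List.drop_zero, List.head?_cons, Option.some.injEq] at hh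
      rintro rfl; exact hx hh.symm

theorem loopA_eq_loopB (k : Nat) : ∀ (s : List Char), s.length ≤ k →
    ∀ (prev : Option Char) (c0 c1 : Int),
    (∀ h, s.head? = some h → prev ≠ some h) →
    loopA s c0 c1 = loopB s prev c0 c1 := by
  induction k with
  | zero =>
    intro s hs prev c0 c1 _
    have : s = [] := List.length_eq_zero_iff.mp (Nat.le_zero.mp hs)
    subst this; simp [loopA, loopB]
  | succ k ih =>
    intro s hs prev c0 c1 hfresh
    match s with
    | [] => simp [loopA, loopB]
    | x :: xs =>
      have hne : some x ≠ prev := fun h => hfresh x rfl h.symm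
      have hdrop : (x :: xs).drop (innerA x (x :: xs)) = xs.drop (innerA x xs) := by
        simp [innerA]
      have hlen : (xs.drop (innerA x xs)).length ≤ k := by
        simp only [List.length_cons] at hs
        have := List.length_drop (l := xs) (i := innerA x xs)
        omega
      have hfresh' : ∀ h, (xs.drop (innerA x xs)).head? = some h → (some x : Option Char) ≠ some h := by
        intro h hh heq
        exact (head_drop_innerA xs x h hh) (by injection heq with e; exact e.symm)
      by_cases hx : x = '0'
      · simp only [loopA, loopB, hdrop, if_pos hne, if_pos hx, if_true]
        rw [skipB xs x (c0 + 1) c1]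
        exact ih _ hlen (some x) (c0 + 1) c1 hfresh'
      · simp only [loopA, loopB, hdrop, if_pos hne, if_neg hx, if_true]
        rw [skipB xs x c0 (c1 + 1)]
        exact ih _ hlen (some x) c0 (c1 + 1) hfresh'

-- ===== VERDICT (by name: the statement is the Claim_ definition above) =====
theorem solution_spec : Claim_equal_solution := by
  intro n _
  unfold Spec_solution solution solution_alt
  rw [loopA_eq_loopB n.toList.length n.toList le_rfl none 0 0 (by simp)]
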